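-- pv_equiv track=rewrite | github.com/dzulfikar68/siplah-skripsi | siplah/preproses.py | koleksi
-- ===== SOURCE A (Python) =====
-- def koleksi(dokumen):
-- 	store = []
-- 	for artikel in dokumen:
-- 		store.extend(artikel)
-- 	store = set(store)
-- 	store = list(store)
-- 	store.sort()
-- 	return store
-- ===== SOURCE B (Python) =====
-- def koleksi(dokumen):
-- 	flat = []
-- 	for artikel in dokumen:
-- 		flat += artikel
-- 	flat.sort()
-- 	out = []
-- 	prev = None
-- 	for tok in flat:
-- 		if prev is None or tok != prev:
-- 			out.append(tok)
-- 		prev = tok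
-- 	return out
-- ===== Notes on version B (the rewrite author's own statement) =====
-- stated objective: alternative
-- what changed: B flattens, sorts the whole multiset once, and deduplicates by a single adjacency scan (append a token only when it differs from the previous one), never building a set.
import Mathlib
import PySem

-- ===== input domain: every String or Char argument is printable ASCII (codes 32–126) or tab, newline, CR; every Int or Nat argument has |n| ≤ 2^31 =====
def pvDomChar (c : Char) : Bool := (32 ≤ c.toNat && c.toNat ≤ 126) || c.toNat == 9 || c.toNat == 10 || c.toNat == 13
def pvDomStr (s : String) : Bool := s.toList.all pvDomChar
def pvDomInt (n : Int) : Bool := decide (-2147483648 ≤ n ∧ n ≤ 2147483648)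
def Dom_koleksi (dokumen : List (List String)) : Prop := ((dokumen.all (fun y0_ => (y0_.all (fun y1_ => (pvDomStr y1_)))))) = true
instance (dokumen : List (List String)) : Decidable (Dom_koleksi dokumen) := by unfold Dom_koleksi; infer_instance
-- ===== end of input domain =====

-- B flattens, sorts once, then deduplicates by a single adjacency scan instead of building a set; alternative decomposition, same asymptotic cost.


-- ===== PORT A =====
def koleksi (dokumen : List (List String)) : List String :=
  let store := dokumen.foldl (fun s artikel => s ++ artikel) []
  let store := PySem.Set.ofList store
  PySem.List.sorted store (fun x => x) false

-- ===== PORT B =====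
-- one step of B's dedup loop: state = (out, prev)
def pvDedupStep (st : List String × Option String) (tok : String) : List String × Option String :=
  (if st.2 = some tok then st.1 else st.1 ++ [tok], some tok)

def koleksi_alt (dokumen : List (List String)) : List String :=
  let flat := dokumen.foldl (fun s artikel => s ++ artikel) []
  let flat := PySem.List.sorted flat (fun x => x) false
  (flat.foldl pvDedupStep ([], none)).1

-- ===== PRECONDITION & SPEC =====
def Spec_koleksi (dokumen : List (List String)) (out : List String) : Prop := out = koleksi_alt dokumen
instance (dokumen : List (List String)) (out : List String) : Decidable (Spec_koleksi dokumen out) := by unfold Spec_koleksi; infer_instance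

-- ===== CLAIM (what is proved, stated in full; the proofs are below) =====
def Claim_equal_koleksi : Prop := ∀ (dokumen : List (List String)), Dom_koleksi dokumen → Spec_koleksi dokumen (koleksi dokumen)

-- ===== LEMMAS AND PROOFS =====

-- recursive form of B's dedup loop (proof helper)
def pvG (p : Option String) : List String → List String
  | [] => []
  | x :: t => if p = some x then pvG (some x) t else x :: pvG (some x) t

theorem pvFoldl_eq_g (l : List String) : ∀ (out : List String) (p : Option String),
    (l.foldl pvDedupStep (out, p)).1 = out ++ pvG p l := by
  induction l with
  | nil => intro out p; simp [pvG]
  | cons x t ih =>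
    intro out p
    simp only [List.foldl_cons, pvDedupStep, pvG]
    by_cases h : p = some x <;> simp [h, ih]

theorem pvMem_g (ys : List String) : ∀ (p : Option String) (a : String),
    ys.Pairwise (· ≤ ·) → (∀ q x, p = some q → x ∈ ys → q ≤ x) →
    (a ∈ pvG p ys ↔ a ∈ ys ∧ p ≠ some a) := by
  induction ys with
  | nil => intro p a _ _; simp [pvG]
  | cons x t ih =>
    intro p a hpw hlb
    have hx : ∀ y ∈ t, x ≤ y := (List.pairwise_cons.mp hpw).1
    have hpw' := (List.pairwise_cons.mp hpw).2
    have hlb' : ∀ q y, some x = some q → y ∈ t → q ≤ y := by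
      intro q y hq hy; cases hq; exact hx y hy
    by_cases h : p = some x
    · subst h
      simp only [pvG, if_true]
      rw [ih (some x) a hpw' hlb']
      constructor
      · rintro ⟨ha, hne⟩
        exact ⟨List.mem_cons_of_mem _ ha, hne⟩
      · rintro ⟨ha, hne⟩
        rcases List.mem_cons.mp ha with rfl | ha
        · exact absurd rfl hne
        · exact ⟨ha, hne⟩
    · simp only [pvG, if_neg h, List.mem_cons]
      rw [ih (some x) a hpw' hlb']
      constructor
      · rintro (rfl | ⟨ha, hne⟩)
        · exact ⟨Or.inl rfl, fun hp => h hp⟩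
        · refine ⟨Or.inr ha, ?_⟩
          intro hp
          have hax : x ≠ a := fun he => hne (by rw [he])
          have h1 : a ≤ x := hlb a x hp (List.mem_cons_self)
          have h2 : x ≤ a := hx a ha
          exact hax (le_antisymm h2 h1)
      · rintro ⟨rfl | ha, hne⟩
        · exact Or.inl rfl
        · by_cases hax : a = x
          · exact Or.inl hax
          · exact Or.inr ⟨ha, fun he => hax (Option.some.inj he).symm⟩

theorem pvPairwise_g (ys : List String) : ∀ (p : Option String),
    ys.Pairwise (· ≤ ·) → (pvG p ys).Pairwise (· < ·) := by
  induction ys with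
  | nil => intro p _; simp [pvG]
  | cons x t ih =>
    intro p hpw
    have hx : ∀ y ∈ t, x ≤ y := (List.pairwise_cons.mp hpw).1
    have hpw' := (List.pairwise_cons.mp hpw).2
    have hrec := ih (some x) hpw'
    by_cases h : p = some x
    · simpa [pvG, h] using hrec
    · simp only [pvG, if_neg h]
      refine List.pairwise_cons.mpr ⟨?_, hrec⟩
      intro a ha
      have := (pvMem_g t (some x) a hpw'
        (fun q y hq hy => by cases hq; exact hx y hy)).mp ha
      rcases this with ⟨hat, hne⟩
      exact lt_of_le_of_ne (hx a hat) (fun he => hne (by rw [he]))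

-- ===== VERDICT (by name: the statement is the Claim_ definition above) =====
theorem koleksi_spec : Claim_equal_koleksi := by
  intro dokumen _
  unfold Spec_koleksi koleksi koleksi_alt
  set xs := dokumen.foldl (fun s artikel => s ++ artikel) [] with hxs
  set ys := PySem.List.sorted xs (fun x => x) false with hys
  rw [pvFoldl_eq_g, List.nil_append]
  have hpw : ys.Pairwise (· ≤ ·) := by
    simpa using PySem.List.sorted_pairwise xs (fun x => x)
  have hmem : ∀ a, a ∈ pvG none ys ↔ a ∈ PySem.Set.ofList xs := by
    intro a
    rw [pvMem_g ys none a hpw (fun q x hq _ => by cases hq)]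
    simp [PySem.Set.mem_ofList, PySem.List.mem_sorted, hys]
  have hpl : (pvG none ys).Pairwise (· < ·) := pvPairwise_g ys none hpw
  have hperm : (pvG none ys).Perm (PySem.Set.ofList xs) := by
    apply (List.perm_ext_iff_of_nodup hpl.nodup (PySem.Set.nodup_ofList xs)).mpr
    exact hmem
  show PySem.List.sorted (PySem.Set.ofList xs) (fun x => x) false = pvG none ys
  exact (PySem.List.sorted_eq_of_perm_of_pairwise_lt (PySem.Set.ofList xs) (pvG none ys) (fun x => x) hperm (by simpa using hpl))
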